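-- pv_equiv track=rewrite | github.com/LautaroAguila/IntroduccionProgramacion | python/parcial2.py | columnas_repetidas
-- ===== SOURCE A (Python) =====
-- def columnas_repetidas(mat: list[list[int]]) -> bool:
--     columnas = []
--     for i in mat[0]:
--         columnas += [[i]]
--     for h in range(1,len(mat)):
--         j = 0
--         for k in mat[h]:
--             columnas[j] += [k]
--             j+=1
--     mitad1 = []
--     mitad2 = []
--     for a in range(int(len(columnas)/2)):
--         mitad1 += [columnas[a]]
--     for b in range(int(len(columnas)/2),len(columnas)):
--         mitad2 += [columnas[b]]
--     return mitad1 == mitad2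
-- ===== SOURCE B (Python) =====
-- def columnas_repetidas(mat: list[list[int]]) -> bool:
--     half = len(mat[0]) // 2 if mat else 0
--     return all(row[:half] == row[half:] for row in mat)
-- ===== Notes on version B (the rewrite author's own statement) =====
-- stated objective: simpler
-- what changed: Instead of materialising the column lists and copying them into two half-lists to compare, B checks each row directly: its first half slice must equal its remaining slice (no transpose, no intermediate lists, short-circuiting).
import Mathlib
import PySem

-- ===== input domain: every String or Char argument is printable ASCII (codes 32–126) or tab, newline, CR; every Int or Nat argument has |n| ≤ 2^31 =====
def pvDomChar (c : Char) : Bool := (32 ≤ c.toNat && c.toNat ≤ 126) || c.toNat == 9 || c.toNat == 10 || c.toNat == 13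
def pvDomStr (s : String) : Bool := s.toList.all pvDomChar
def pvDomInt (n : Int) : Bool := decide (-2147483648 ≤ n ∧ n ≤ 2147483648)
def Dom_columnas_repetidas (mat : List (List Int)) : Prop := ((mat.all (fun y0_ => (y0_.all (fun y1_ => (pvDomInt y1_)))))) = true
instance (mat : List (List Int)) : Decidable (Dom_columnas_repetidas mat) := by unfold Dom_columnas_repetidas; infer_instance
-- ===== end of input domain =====

-- B replaces A's column transpose and comparison of the two half-lists of columns by a direct
-- per-row check that the first half of the row equals the rest (simpler; no column lists built).

-- ===== PORT A =====
-- inner loop 'for k in mat[h]: columnas[j] += [k]; j += 1' (List.set is a no-op out of range;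
-- Pre_ excludes exactly the inputs where Python's columnas[j] would raise IndexError)
def pvAddRowGo : List (List Int) → Nat → List Int → List (List Int)
  | cols, _, [] => cols
  | cols, j, k :: ks => pvAddRowGo (cols.set j (cols.getD j [] ++ [k])) (j+1) ks

-- 'columnas = []; for i in mat[0]: columnas += [[i]]; for h in range(1,len(mat)): …'
def pvColumnas (mat : List (List Int)) : List (List Int) :=
  (PySem.List.pyRange 1 (PySem.List.len mat) 1).foldl
    (fun cols h => pvAddRowGo cols 0 (PySem.List.pyGetD mat h []))
    ((PySem.List.pyGetD mat 0 []).foldl (fun acc i => acc ++ [[i]]) [])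

-- 'mitad1 = []; for a in range(int(len(columnas)/2)): mitad1 += [columnas[a]]'
-- (int(len/2) on a nonnegative len is floor division)
def pvMitad1 (columnas : List (List Int)) : List (List Int) :=
  (PySem.List.pyRange 0 (PySem.Int.floordiv (PySem.List.len columnas) 2) 1).foldl
    (fun acc a => acc ++ [PySem.List.pyGetD columnas a []]) []

-- 'mitad2 = []; for b in range(int(len(columnas)/2),len(columnas)): mitad2 += [columnas[b]]'
def pvMitad2 (columnas : List (List Int)) : List (List Int) :=
  (PySem.List.pyRange (PySem.Int.floordiv (PySem.List.len columnas) 2) (PySem.List.len columnas) 1).foldl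
    (fun acc b => acc ++ [PySem.List.pyGetD columnas b []]) []

def columnas_repetidas (mat : List (List Int)) : Bool :=
  pvMitad1 (pvColumnas mat) == pvMitad2 (pvColumnas mat)

-- ===== PORT B =====
-- row[:half] and row[half:] with half : Nat are take/drop (PySem.List.slice_to_natCast / slice_from_natCast)
def columnas_repetidas_alt (mat : List (List Int)) : Bool :=
  let half := if mat = [] then 0 else (PySem.List.pyGetD mat 0 []).length / 2
  mat.all (fun row => row.take half == row.drop half)

-- ===== PRECONDITION & SPEC =====
-- Pre_ excludes exactly the inputs on which A raises IndexError: empty mat (mat[0]) and a row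
-- longer than the first row (columnas[j] out of range).
def Pre_columnas_repetidas (mat : List (List Int)) : Prop :=
  mat ≠ [] ∧ ∀ r ∈ mat, r.length ≤ (mat.headD []).length
instance (mat : List (List Int)) : Decidable (Pre_columnas_repetidas mat) := by
  unfold Pre_columnas_repetidas; infer_instance

def pvWitness_columnas_repetidas : List (List Int) := [[1, 1], [2, 2]]

def Spec_columnas_repetidas (mat : List (List Int)) (out : Bool) : Prop := out = columnas_repetidas_alt mat
instance (mat : List (List Int)) (out : Bool) : Decidable (Spec_columnas_repetidas mat out) := by unfold Spec_columnas_repetidas; infer_instance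

-- ===== CLAIM (what is proved, stated in full; the proofs are below) =====
def Claim_equal_columnas_repetidas : Prop := ∀ (mat : List (List Int)), Dom_columnas_repetidas mat → Pre_columnas_repetidas mat → Spec_columnas_repetidas mat (columnas_repetidas mat)

-- ===== LEMMAS AND PROOFS =====

-- the j-th column A builds: the j-th element of every row long enough, in row order
def pvCol (mat : List (List Int)) (j : Nat) : List Int := mat.filterMap (fun r => r[j]?)

theorem pvAddRowGo_getElem? (row : List Int) : ∀ (cols : List (List Int)) (j i : Nat),
    (pvAddRowGo cols j row)[i]? =
      cols[i]?.map (fun c => c ++ if i < j then [] else (row[i - j]?).toList) := by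
  induction row with
  | nil =>
    intro cols j i
    simp [pvAddRowGo]
  | cons k ks ih =>
    intro cols j i
    rw [pvAddRowGo, ih]
    rcases Nat.lt_trichotomy i j with hij | hij | hij
    · rw [List.getElem?_set_ne (by omega)]
      simp [Nat.le_of_lt hij, hij]
    · subst hij
      rw [List.getElem?_set]
      rcases Nat.lt_or_ge i cols.length with h | h
      · simp [h, List.getD_eq_getElem?_getD]
      · simp [Nat.not_lt.mpr h]
    · rw [List.getElem?_set_ne (by omega)]
      have h1 : ¬ i < j + 1 := by omega
      have h2 : ¬ i < j := by omega
      have h3 : i - (j+1) = i - j - 1 := by omega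
      have h4 : (k :: ks)[i - j]? = ks[i - j - 1]? := by
        have : i - j = (i - j - 1) + 1 := by omega
        rw [this, List.getElem?_cons_succ]
        simp
      simp [h1, h2, h3, h4]

theorem foldl_addRow_getElem? (rows : List (List Int)) :
    ∀ (cols : List (List Int)) (i : Nat),
    (rows.foldl (fun c r => pvAddRowGo c 0 r) cols)[i]? =
      cols[i]?.map (fun c => c ++ rows.filterMap (fun r => r[i]?)) := by
  induction rows with
  | nil => intro cols i; simp
  | cons r rows ih =>
    intro cols i
    rw [List.foldl_cons, ih, pvAddRowGo_getElem?]
    cases hr : r[i]? <;>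
      simp [hr, Option.map_map, Function.comp_def, List.append_assoc]

theorem columnas_closed (r0 : List Int) (rest : List (List Int)) :
    (rest.foldl (fun c r => pvAddRowGo c 0 r) (r0.map (fun i => [i]))) =
      (List.range r0.length).map (fun j => pvCol (r0 :: rest) j) := by
  apply List.ext_getElem?
  intro i
  rw [foldl_addRow_getElem?]
  by_cases hi : i < r0.length
  · simp [hi, pvCol, List.filterMap_cons]
  · simp [Nat.not_lt.mp hi]

theorem pvColumnas_eq (r0 : List Int) (rest : List (List Int)) :
    pvColumnas (r0 :: rest) = (List.range r0.length).map (fun j => pvCol (r0 :: rest) j) := by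
  unfold pvColumnas
  rw [PySem.List.pyGetD_zero_cons, PySem.List.foldl_append_singleton_eq_map, List.nil_append]
  rw [PySem.List.foldl_pyRange_pyGetD]
  · exact columnas_closed r0 rest
  · omega

theorem floordiv_len (n : Nat) : PySem.Int.floordiv ((n : Nat) : Int) 2 = ((n / 2 : Nat) : Int) := by
  exact_mod_cast PySem.Int.floordiv_natCast n 2

theorem range_map_getD_eq_take {α : Type} [Inhabited α] (l : List α) (h : Nat) (d : α) (hh : h ≤ l.length) :
    (List.range h).map (fun k => l.getD k d) = l.take h := by
  apply List.ext_getElem (by simp; omega)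
  intro i h1 h2
  simp at h1 ⊢
  simp [List.getElem?_eq_getElem (show i < l.length by omega)]

theorem pvMitad1_eq (cols : List (List Int)) : pvMitad1 cols = cols.take (cols.length / 2) := by
  unfold pvMitad1
  rw [PySem.List.foldl_append_singleton_eq_map, List.nil_append]
  rw [show PySem.List.len cols = ((cols.length : Nat) : Int) from by simp]
  rw [floordiv_len, PySem.List.pyRange_zero_natCast]
  rw [List.map_map]
  have : ((fun a => PySem.List.pyGetD cols a []) ∘ (fun k : Nat => (k : Int))) = fun k : Nat => cols.getD k [] := by
    funext k; simp
  rw [this]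
  exact range_map_getD_eq_take cols _ [] (Nat.div_le_self _ _ |>.trans (by omega))

theorem pvMitad2_eq (cols : List (List Int)) : pvMitad2 cols = cols.drop (cols.length / 2) := by
  unfold pvMitad2
  rw [PySem.List.foldl_append_singleton_eq_map, List.nil_append]
  rw [show PySem.Int.floordiv (PySem.List.len cols) 2 = ((cols.length / 2 : Nat) : Int) from by
    rw [show PySem.List.len cols = ((cols.length : Nat) : Int) from by simp, floordiv_len]]
  rw [PySem.List.map_pyGetD_pyRange]
  · simp
    omega
  · positivity

-- halves of a list (not longer than 2*h) are equal iff it agrees with its h-shift pointwise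
theorem rowiff {α : Type} (r : List α) (h : Nat) (hlen : r.length ≤ 2*h) :
    (r.take h = r.drop h) ↔ ∀ j, j < h → r[j]? = r[h+j]? := by
  constructor
  · intro he j hj
    have := congrArg (fun l => l[j]?) he
    simpa [List.getElem?_take, hj, List.getElem?_drop] using this
  · intro hj
    apply List.ext_getElem?
    intro i
    rw [List.getElem?_take, List.getElem?_drop]
    by_cases hi : i < h
    · simp [hi, hj i hi]
    · simp [hi, List.getElem?_eq_none (show r.length ≤ h + i by omega)]

-- equal counts force the implication p → q to be an equivalence on the list
theorem countP_eq_imp {α : Type} (p q : α → Bool) :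
    ∀ (l : List α), (∀ x ∈ l, p x → q x) → l.countP q ≤ l.countP p →
      ∀ x ∈ l, q x → p x := by
  intro l
  induction l with
  | nil => simp
  | cons a l ih =>
    intro himp hc x hx hq
    have hmono : l.countP p ≤ l.countP q :=
      List.countP_mono_left (fun y hy => himp y (List.mem_cons_of_mem a hy))
    cases hpa : p a
    · have hqa : q a = false := by
        cases hqa : q a
        · rfl
        · exfalso
          rw [List.countP_cons, List.countP_cons, hpa, hqa] at hc
          simp at hc
          omega
      rcases List.mem_cons.mp hx with rfl | hx'
      · rw [hq] at hqa; cases hqa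
      · exact ih (fun y hy => himp y (List.mem_cons_of_mem a hy))
          (by rw [List.countP_cons, List.countP_cons, hpa] at hc; simp at hc; omega) x hx' hq
    · rcases List.mem_cons.mp hx with rfl | hx'
      · exact hpa
      · have hqa : q a = true := himp a List.mem_cons_self hpa
        exact ih (fun y hy => himp y (List.mem_cons_of_mem a hy))
          (by rw [List.countP_cons, List.countP_cons, hpa, hqa] at hc; simpa using hc) x hx' hq

-- if all rows have length 0 or 2*h, equal column lists give pointwise equal entries
theorem filterMap_eq_pointwise (j h : Nat) (hj : j < h) :
    ∀ (l : List (List Int)), (∀ r ∈ l, r.length = 0 ∨ r.length = 2*h) →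
      l.filterMap (fun r => r[j]?) = l.filterMap (fun r => r[h+j]?) →
      ∀ r ∈ l, r[j]? = r[h+j]? := by
  intro l
  induction l with
  | nil => simp
  | cons a l ih =>
    intro hlen heq r hr
    rcases hlen a List.mem_cons_self with ha | ha
    · have h1 : a[j]? = none := List.getElem?_eq_none (by omega)
      have h2 : a[h+j]? = none := List.getElem?_eq_none (by omega)
      rw [List.filterMap_cons, List.filterMap_cons, h1, h2] at heq
      rcases List.mem_cons.mp hr with rfl | hr'
      · rw [h1, h2]
      · exact ih (fun y hy => hlen y (List.mem_cons_of_mem a hy)) heq r hr'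
    · have h1 : j < a.length := by omega
      have h2 : h + j < a.length := by omega
      rw [List.filterMap_cons, List.filterMap_cons,
        List.getElem?_eq_getElem h1, List.getElem?_eq_getElem h2] at heq
      simp only at heq
      injection heq with hhead htail
      rcases List.mem_cons.mp hr with rfl | hr'
      · rw [List.getElem?_eq_getElem h1, List.getElem?_eq_getElem h2, hhead]
      · exact ih (fun y hy => hlen y (List.mem_cons_of_mem a hy)) htail r hr'

-- main combinatorial equivalence, even width 2*h, all rows ≤ 2*h
theorem cols_iff_rows (h : Nat) (mat : List (List Int))
    (hall : ∀ r ∈ mat, r.length ≤ 2*h) :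
    (∀ j, j < h → pvCol mat j = pvCol mat (h+j)) ↔
      (∀ r ∈ mat, r.take h = r.drop h) := by
  constructor
  · intro H r hr
    rw [rowiff r h (hall r hr)]
    by_cases h0 : h = 0
    · intro j hj; omega
    · -- counting: every row has length 0 or 2*h
      have hlenrows : ∀ r ∈ mat, r.length = 0 ∨ r.length = 2*h := by
        intro r hr
        by_contra hcon
        rw [not_or] at hcon
        have hc1 : 1 ≤ r.length := by omega
        have hc2 : r.length ≤ 2*h - 1 := by have := hall r hr; omega
        set c := r.length with hc
        have cnt_anti : ∀ j j' : Nat, j ≤ j' →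
            mat.countP (fun x => (x[j']?).isSome) ≤ mat.countP (fun x => (x[j]?).isSome) := by
          intro j j' hjj
          exact List.countP_mono_left (fun y _ hs => by
            simp [isSome_getElem?] at hs ⊢; omega)
        have cnt_eq : ∀ j, j < h →
            mat.countP (fun x => (x[j]?).isSome) = mat.countP (fun x => (x[h+j]?).isSome) := by
          intro j hj
          have := congrArg List.length (H j hj)
          simpa [pvCol, List.length_filterMap_eq_countP] using this
        have e1 := cnt_eq 0 (by omega)
        have e2 := cnt_eq (h-1) (by omega)
        rw [show h + (h-1) = 2*h-1 by omega] at e2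
        have i1 := cnt_anti (h-1) h (by omega)
        have i2 := cnt_anti h (2*h-1) (by omega)
        have i3 := cnt_anti 0 c (by omega)
        have i4 := cnt_anti c (2*h-1) (by omega)
        rw [show h + 0 = h by omega] at e1
        have hle : mat.countP (fun x => (x[0]?).isSome) ≤ mat.countP (fun x => (x[c]?).isSome) := by omega
        have := countP_eq_imp (fun x => (x[c]?).isSome) (fun x => (x[0]?).isSome) mat
          (fun x _ hs => by simp [isSome_getElem?] at hs ⊢; omega) hle r hr
          (by simp [isSome_getElem?]; omega)
        simp [isSome_getElem?] at this
        omega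
      intro j hj
      exact filterMap_eq_pointwise j h hj mat hlenrows (H j hj) r hr
  · intro H j hj
    apply List.filterMap_congr
    intro r hr
    exact (rowiff r h (hall r hr)).mp (H r hr) j hj

theorem A_eval (r0 : List Int) (rest : List (List Int)) :
    columnas_repetidas (r0 :: rest) =
      (((List.range r0.length).map (fun j => pvCol (r0 :: rest) j)).take (r0.length / 2) ==
       ((List.range r0.length).map (fun j => pvCol (r0 :: rest) j)).drop (r0.length / 2)) := by
  unfold columnas_repetidas
  rw [pvColumnas_eq, pvMitad1_eq, pvMitad2_eq]
  simp

-- ===== VERDICT =====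
theorem columnas_repetidas_spec : Claim_equal_columnas_repetidas := by
  intro mat _ hpre
  obtain ⟨hne, hall⟩ := hpre
  obtain ⟨r0, rest, rfl⟩ := List.exists_cons_of_ne_nil hne
  simp only [List.headD_cons] at hall
  unfold Spec_columnas_repetidas
  rw [A_eval]
  simp only [columnas_repetidas_alt, PySem.List.pyGetD_zero_cons, if_neg (List.cons_ne_nil r0 rest)]
  rw [Bool.eq_iff_iff]
  simp only [beq_iff_eq, List.all_eq_true, beq_iff_eq]
  set L := r0.length with hL
  set h := L / 2 with hh
  set cols := (List.range L).map (fun j => pvCol (r0 :: rest) j) with hcols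
  have hclen : cols.length = L := by simp [hcols]
  rcases (show L = 2*h ∨ L = 2*h + 1 by omega) with hpar | hpar
  · -- even width
    have hcols2 : cols.length ≤ 2*h := by omega
    rw [rowiff cols h hcols2]
    have hget : ∀ j, j < h → (cols[j]? = cols[h+j]? ↔ pvCol (r0 :: rest) j = pvCol (r0 :: rest) (h+j)) := by
      intro j hj
      rw [hcols]
      rw [List.getElem?_map, List.getElem?_map, List.getElem?_range (by omega : j < L),
        List.getElem?_range (by omega : h + j < L)]
      simp
    constructor
    · intro H
      exact (cols_iff_rows h (r0 :: rest) (fun r hr => by have := hall r hr; omega)).mp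
        (fun j hj => (hget j hj).mp (H j hj))
    · intro H j hj
      exact (hget j hj).mpr
        ((cols_iff_rows h (r0 :: rest) (fun r hr => by have := hall r hr; omega)).mpr H j hj)
  · -- odd width: both sides false
    apply iff_of_false
    · intro heq
      have := congrArg List.length heq
      simp [hclen] at this
      omega
    · intro H
      have := congrArg List.length (H r0 List.mem_cons_self)
      simp [← hL] at this
      omega
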